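-- pv_equiv track=rewrite | github.com/ssmythe/opening_lines_extractor | ole.py | format_moves_as_algebraic
-- ===== SOURCE A (Python) =====
-- def format_moves_as_algebraic(move_list):
--     """
--     Given a list of moves with optional comments (e.g. ["d4 {good move}", "Nf6", "Nf3 {develops knight}", ...]),
--     format them in standard algebraic notation with move numbers.
--     For example, if move_list == ["d4 {good move}", "Nf6", "Nf3 {develops knight}"],
--     the result is: "1.d4 {good move} Nf6 2.Nf3 {develops knight}"
--     """
--     result = []
--     i = 0
--     move_number = 1
--     while i < len(move_list):
--         # White move: prefix with move number and a dot.
--         white_move = f"{move_number}.{move_list[i]}"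
--         result.append(white_move)
--         i += 1
--         # If there's a corresponding Black move, append it.
--         if i < len(move_list):
--             black_move = move_list[i]
--             result.append(black_move)
--             i += 1
--         move_number += 1
--     return " ".join(result)
-- ===== SOURCE B (Python) =====
-- def format_moves_as_algebraic(move_list):
--     return " ".join(
--         f"{i // 2 + 1}.{m}" if i % 2 == 0 else m
--         for i, m in enumerate(move_list)
--     )
-- ===== Notes on version B (the rewrite author's own statement) =====
-- stated objective: idiomatic
-- what changed: Replaces the two-at-a-time while loop with a running move_number accumulator by a single enumerate pass that computes the move number in closed form as i//2+1 for even indices and passes odd-index moves through unchanged.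
import Mathlib
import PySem

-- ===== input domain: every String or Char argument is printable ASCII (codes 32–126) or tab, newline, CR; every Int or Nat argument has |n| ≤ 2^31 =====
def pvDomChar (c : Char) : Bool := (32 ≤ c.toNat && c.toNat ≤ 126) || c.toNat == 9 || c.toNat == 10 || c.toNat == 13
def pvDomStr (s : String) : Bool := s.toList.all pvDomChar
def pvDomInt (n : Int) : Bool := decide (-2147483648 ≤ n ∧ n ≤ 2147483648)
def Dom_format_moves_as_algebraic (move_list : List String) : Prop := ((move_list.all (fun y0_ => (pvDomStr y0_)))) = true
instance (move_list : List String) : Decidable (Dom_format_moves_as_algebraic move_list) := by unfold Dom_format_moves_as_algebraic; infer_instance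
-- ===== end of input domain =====

-- B replaces A's two-at-a-time while loop (with a running move_number accumulator) by a
-- single enumerate pass computing the move number in closed form (i // 2 + 1); objective: idiomatic.

-- ===== PORT A =====
-- the while loop of A: state (i, move_number, result); indexing move_list[i] is always in range here
def pvLoopA (move_list : List String) (i : Nat) (move_number : Int)
    (result : List String) : List String :=
  if h : i < move_list.length then
    let white_move := PySem.Int.toStr move_number ++ "." ++ move_list[i]
    let result := result ++ [white_move]
    if h2 : i + 1 < move_list.length then
      pvLoopA move_list (i + 2) (move_number + 1) (result ++ [move_list[i + 1]])
    else
      pvLoopA move_list (i + 1) (move_number + 1) result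
  else result
termination_by move_list.length - i

def format_moves_as_algebraic (move_list : List String) : String :=
  PySem.Str.join " " (pvLoopA move_list 0 1 [])

-- ===== PORT B =====
def pvFmtB (p : Int × String) : String :=
  if PySem.Int.mod p.1 2 == 0 then
    PySem.Int.toStr (PySem.Int.floordiv p.1 2 + 1) ++ "." ++ p.2
  else p.2

def format_moves_as_algebraic_alt (move_list : List String) : String :=
  PySem.Str.join " " ((PySem.List.enumerate move_list).map pvFmtB)

-- ===== PRECONDITION & SPEC =====
def Spec_format_moves_as_algebraic (move_list : List String) (out : String) : Prop := out = format_moves_as_algebraic_alt move_list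
instance (move_list : List String) (out : String) : Decidable (Spec_format_moves_as_algebraic move_list out) := by unfold Spec_format_moves_as_algebraic; infer_instance

-- ===== CLAIM (what is proved, stated in full; the proofs are below) =====
def Claim_equal_format_moves_as_algebraic : Prop := ∀ (move_list : List String), Dom_format_moves_as_algebraic move_list → Spec_format_moves_as_algebraic move_list (format_moves_as_algebraic move_list)

-- ===== LEMMAS AND PROOFS =====

lemma pvFmtB_even (i : Nat) (s : String) (h : i % 2 = 0) :
    pvFmtB ((i : Int), s) = PySem.Int.toStr (((i / 2 : Nat) : Int) + 1) ++ "." ++ s := by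
  simp [pvFmtB]
  intro hc
  omega

lemma pvFmtB_odd (i : Nat) (s : String) (h : i % 2 = 1) :
    pvFmtB ((i : Int), s) = s := by
  simp [pvFmtB]
  omega

lemma pvLoopA_eq (k : Nat) (ml : List String) : ∀ (i : Nat) (acc : List String),
    ml.length - i ≤ k → i % 2 = 0 →
    pvLoopA ml i (((i / 2 : Nat) : Int) + 1) acc
      = acc ++ (PySem.List.enumerate (ml.drop i) (i : Int)).map pvFmtB := by
  induction k with
  | zero =>
    intro i acc hk hev
    have h : ¬ i < ml.length := by omega
    have hnil : ml.drop i = [] := List.drop_eq_nil_of_le (by omega)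
    rw [pvLoopA, dif_neg h, hnil, PySem.List.enumerate_nil]
    simp
  | succ k ih =>
    intro i acc hk hev
    by_cases h : i < ml.length
    · have hdrop : ml.drop i = ml[i] :: ml.drop (i + 1) :=
        List.drop_eq_getElem_cons h
      rw [pvLoopA, dif_pos h, hdrop, PySem.List.enumerate_cons]
      by_cases h2 : i + 1 < ml.length
      · have hdrop2 : ml.drop (i + 1) = ml[i+1] :: ml.drop (i + 2) :=
          List.drop_eq_getElem_cons h2
        rw [dif_pos h2, hdrop2, PySem.List.enumerate_cons]
        have hrec := ih (i + 2) (acc ++ [PySem.Int.toStr (((i / 2 : Nat) : Int) + 1) ++ "." ++ ml[i]] ++ [ml[i+1]]) (by omega) (by omega)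
        have hodd : pvFmtB ((i : Int) + 1, ml[i+1]) = ml[i+1] := by
          have := pvFmtB_odd (i + 1) ml[i+1] (by omega)
          simpa [Nat.cast_add] using this
        have h22 : (i + 2) / 2 = i / 2 + 1 := by omega
        rw [h22] at hrec
        push_cast at hrec ⊢
        simp only [List.map_cons, pvFmtB_even i ml[i] hev, hodd]
        push_cast
        rw [hrec]
        simp
        ring_nf
      · rw [dif_neg h2]
        have hnil : ml.drop (i + 1) = [] := List.drop_eq_nil_of_le (by omega)
        rw [pvLoopA, dif_neg (by omega : ¬ i + 1 < ml.length), hnil,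
          PySem.List.enumerate_nil]
        simp [pvFmtB_even i ml[i] hev]
    · have hnil : ml.drop i = [] := List.drop_eq_nil_of_le (by omega)
      rw [pvLoopA, dif_neg h, hnil, PySem.List.enumerate_nil]
      simp

-- ===== VERDICT (by name: the statement is the Claim_ definition above) =====
theorem format_moves_as_algebraic_spec : Claim_equal_format_moves_as_algebraic := by
  intro ml _
  unfold Spec_format_moves_as_algebraic format_moves_as_algebraic format_moves_as_algebraic_alt
  have h0 := pvLoopA_eq ml.length ml 0 [] (by omega) (by omega)
  simp only [Nat.zero_div, Nat.cast_zero, zero_add, List.drop_zero, List.nil_append] at h0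
  rw [h0]
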